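-- pv_equiv track=rewrite | github.com/jhs9497/Algo-Lego | hyunsix/0910_괄호변환.py | check
-- ===== SOURCE A (Python) =====
-- def check(p):
--     is_open = 0
--     u = ""
--     v = ""
--     for i in range(len(p)):
--         if p[i] == '(':
--             is_open += 1
--         else:
--             is_open -= 1
--
--         if i > 0 and is_open == 0:
--             u = p[0:i + 1]
--             v = p[i + 1:]
--             break
--
--     is_open = 0
--     for i in range(len(u)):
--         if u[i] == '(':
--             is_open += 1
--         else:
--             if is_open > 0:
--                 is_open -= 1
--
--     if is_open == 0:
--         return u, v, True
--
--     return u, v, False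
-- ===== SOURCE B (Python) =====
-- def check(p):
--     bal = 0
--     for i in range(len(p)):
--         bal += 1 if p[i] == '(' else -1
--         if bal == 0:
--             # minimal balanced prefix is correctly nested iff it starts with '('
--             return p[:i + 1], p[i + 1:], p[0] == '('
--     return "", "", True
-- ===== Notes on version B (the rewrite author's own statement) =====
-- stated objective: simpler
-- what changed: B keeps A's first balance-tracking scan but deletes A's entire second validation loop, replacing it with the closed-form rule that the minimal balanced prefix is correctly nested iff it starts with '(' (empty prefix counts as correct), so B is a single pass with an early return.
import Mathlib
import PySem

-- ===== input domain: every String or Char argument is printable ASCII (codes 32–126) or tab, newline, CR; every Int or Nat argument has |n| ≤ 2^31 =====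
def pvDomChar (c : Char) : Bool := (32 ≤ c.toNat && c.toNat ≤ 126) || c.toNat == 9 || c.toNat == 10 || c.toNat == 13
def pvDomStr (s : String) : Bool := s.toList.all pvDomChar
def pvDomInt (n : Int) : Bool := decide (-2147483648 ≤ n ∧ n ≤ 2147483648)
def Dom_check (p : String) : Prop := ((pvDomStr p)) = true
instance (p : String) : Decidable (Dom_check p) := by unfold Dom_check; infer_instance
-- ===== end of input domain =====

-- B replaces A's second validation loop by the closed-form first-character rule; same return value, one pass.

-- ===== PORT A =====
-- A's first loop: running balance, break at the first index i (with i > 0) where it is 0.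
-- Returns the break index; none = no break (u and v stay "").
def aFind : List Char → Int → Nat → Option Nat
  | [], _, _ => none
  | c :: rest, bal, i =>
    let bal' := if c = '(' then bal + 1 else bal - 1
    if i > 0 ∧ bal' = 0 then some i else aFind rest bal' (i + 1)

-- A's second loop over u: guarded decrement.
def aLoop2 : List Char → Int → Int
  | [], bal => bal
  | c :: rest, bal =>
    if c = '(' then aLoop2 rest (bal + 1)
    else aLoop2 rest (if bal > 0 then bal - 1 else bal)

-- p[0:i+1] / p[i+1:] with 0 ≤ i+1 ≤ len p are exactly take/drop on the char list.
def check (p : String) : String × String × Bool :=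
  let cs := p.toList
  let uv : List Char × List Char :=
    match aFind cs 0 0 with
    | some i => (cs.take (i + 1), cs.drop (i + 1))
    | none => ([], [])
  (String.mk uv.1, String.mk uv.2, decide (aLoop2 uv.1 0 = 0))

-- ===== PORT B =====
-- B's single scan: break at the first index where the running balance is 0.
def bFind : List Char → Int → Nat → Option Nat
  | [], _, _ => none
  | c :: rest, bal, i =>
    let bal' := bal + (if c = '(' then 1 else -1)
    if bal' = 0 then some i else bFind rest bal' (i + 1)

-- p[0] == '(' on the (nonempty, since the scan broke) string is cs.head? = some '('.
def check_alt (p : String) : String × String × Bool :=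
  let cs := p.toList
  match bFind cs 0 0 with
  | some i => (String.mk (cs.take (i + 1)), String.mk (cs.drop (i + 1)), decide (cs.head? = some '('))
  | none => ("", "", true)

-- ===== PRECONDITION & SPEC =====
def Spec_check (p : String) (out : String × String × Bool) : Prop := out = check_alt p
instance (p : String) (out : String × String × Bool) : Decidable (Spec_check p out) := by unfold Spec_check; infer_instance

-- ===== CLAIM (what is proved, stated in full; the proofs are below) =====
def Claim_equal_check : Prop := ∀ (p : String), Dom_check p → Spec_check p (check p)

-- ===== LEMMAS AND PROOFS =====

-- signed balance sum of a char list
def bsum : List Char → Int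
  | [] => 0
  | c :: rest => (if c = '(' then 1 else -1) + bsum rest

theorem aFind_eq_bFind_pos : ∀ (cs : List Char) (bal : Int) (i : Nat), 0 < i →
    aFind cs bal i = bFind cs bal i := by
  intro cs
  induction cs with
  | nil => intro bal i _; rfl
  | cons c rest ih =>
    intro bal i hi
    simp only [aFind, bFind]
    have hb : (if c = '(' then bal + 1 else bal - 1) = bal + (if c = '(' then 1 else -1) := by
      split <;> ring
    rw [hb]
    by_cases h0 : bal + (if c = '(' then 1 else -1) = 0
    · simp [h0, hi]
    · simp [h0, ih _ _ (Nat.succ_pos i)]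

theorem aFind_top_eq : ∀ (cs : List Char), aFind cs 0 0 = bFind cs 0 0 := by
  intro cs
  cases cs with
  | nil => rfl
  | cons c rest =>
    simp only [aFind, bFind]
    have h0 : (0 : Int) + (if c = '(' then 1 else -1) ≠ 0 := by split <;> omega
    have hb : (if c = '(' then (0:Int) + 1 else 0 - 1) = 0 + (if c = '(' then 1 else -1) := by
      split <;> ring
    simp only [hb, h0, if_false, Nat.lt_irrefl, false_and, if_neg (by simp : ¬ (0 > 0 ∧ (0:Int) + (if c = '(' then 1 else -1) = 0))]
    exact aFind_eq_bFind_pos rest _ 1 Nat.one_pos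

theorem bFind_le : ∀ (cs : List Char) (bal : Int) (i j : Nat), bFind cs bal i = some j → i ≤ j := by
  intro cs
  induction cs with
  | nil => intro bal i j h; simp [bFind] at h
  | cons c rest ih =>
    intro bal i j h
    by_cases hc : c = '('
    · simp only [bFind, if_pos hc] at h
      split at h
      · injection h with h'; omega
      · exact Nat.le_of_succ_le (ih _ _ _ h)
    · simp only [bFind, if_neg hc] at h
      split at h
      · injection h with h'; omega
      · exact Nat.le_of_succ_le (ih _ _ _ h)

theorem bFind_bsum : ∀ (cs : List Char) (bal : Int) (i j : Nat), bFind cs bal i = some j →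
    bal + bsum (cs.take (j - i + 1)) = 0 := by
  intro cs
  induction cs with
  | nil => intro bal i j h; simp [bFind] at h
  | cons c rest ih =>
    intro bal i j h
    by_cases hc : c = '('
    · simp only [bFind, if_pos hc] at h
      split at h
      · rename_i h0
        have hj : j = i := by injection h with h'; omega
        subst hj
        simp [bsum, hc]
        omega
      · have hle : i + 1 ≤ j := bFind_le rest _ _ _ h
        have := ih _ _ _ h
        have hidx : j - i + 1 = (j - (i + 1) + 1) + 1 := by omega
        rw [hidx, List.take_succ_cons]
        simp only [bsum, if_pos hc]
        omega
    · simp only [bFind, if_neg hc] at h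
      split at h
      · rename_i h0
        have hj : j = i := by injection h with h'; omega
        subst hj
        simp [bsum, hc]
        omega
      · have hle : i + 1 ≤ j := bFind_le rest _ _ _ h
        have := ih _ _ _ h
        have hidx : j - i + 1 = (j - (i + 1) + 1) + 1 := by omega
        rw [hidx, List.take_succ_cons]
        simp only [bsum, if_neg hc]
        omega

theorem aLoop2_ge : ∀ (xs : List Char) (bal : Int), bal + bsum xs ≤ aLoop2 xs bal := by
  intro xs
  induction xs with
  | nil => intro bal; simp [aLoop2, bsum]
  | cons c rest ih =>
    intro bal
    simp only [aLoop2, bsum]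
    split
    · have := ih (bal + 1); omega
    · split
      · have := ih (bal - 1); omega
      · have := ih bal; omega

theorem aLoop2_pos_zero : ∀ (cs : List Char) (bal : Int) (i j : Nat), 0 < bal →
    bFind cs bal i = some j → aLoop2 (cs.take (j - i + 1)) bal = 0 := by
  intro cs
  induction cs with
  | nil => intro bal i j _ h; simp [bFind] at h
  | cons c rest ih =>
    intro bal i j hpos h
    by_cases hc : c = '('
    · simp only [bFind, if_pos hc] at h
      have h1 : ¬ (bal + 1 = 0) := by omega
      rw [if_neg h1] at h
      have hle : i + 1 ≤ j := bFind_le rest _ _ _ h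
      have hidx : j - i + 1 = (j - (i + 1) + 1) + 1 := by omega
      rw [hidx, List.take_succ_cons]
      have hrec := ih (bal + 1) _ _ (by omega) h
      simp only [aLoop2, if_pos hc]
      exact hrec
    · simp only [bFind, if_neg hc] at h
      by_cases h0 : bal + -1 = 0
      · rw [if_pos h0] at h
        have hj : j = i := by injection h with h'; omega
        subst hj
        simp only [Nat.sub_self, List.take_succ_cons, List.take_zero, aLoop2, if_neg hc, if_pos hpos]
        omega
      · rw [if_neg h0] at h
        have hle : i + 1 ≤ j := bFind_le rest _ _ _ h
        have hidx : j - i + 1 = (j - (i + 1) + 1) + 1 := by omega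
        rw [hidx, List.take_succ_cons]
        have hrec := ih (bal + -1) _ _ (by omega) h
        simp only [aLoop2, if_neg hc, if_pos hpos]
        have : bal - 1 = bal + -1 := by ring
        rw [this]
        exact hrec

theorem main_eq : ∀ (p : String), check p = check_alt p := by
  intro p
  simp only [check, check_alt, aFind_top_eq]
  generalize p.toList = cs
  cases cs with
  | nil => rfl
  | cons c rest =>
    by_cases hc : c = '('
    · simp only [bFind, if_pos hc]
      have h1 : ¬ ((0:Int) + 1 = 0) := by omega
      rw [if_neg h1]
      cases hfind : bFind rest (0 + 1) 1 with
      | none => rfl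
      | some j =>
        have hle : 1 ≤ j := bFind_le rest _ _ _ hfind
        have hz := aLoop2_pos_zero rest (0 + 1) 1 j (by omega) hfind
        have hidx : j - 1 + 1 = j := by omega
        rw [hidx] at hz
        simp only [List.take_succ_cons, aLoop2, if_pos hc, List.head?]
        norm_num at hz
        simp [hz, hc]
    · simp only [bFind, if_neg hc]
      have h1 : ¬ ((0:Int) + -1 = 0) := by omega
      rw [if_neg h1]
      cases hfind : bFind rest (0 + -1) 1 with
      | none => rfl
      | some j =>
        have hle : 1 ≤ j := bFind_le rest _ _ _ hfind
        have hsum := bFind_bsum rest (0 + -1) 1 j hfind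
        have hge := aLoop2_ge (rest.take (j - 1 + 1)) 0
        have hidx : j - 1 + 1 = j := by omega
        rw [hidx] at hsum hge
        have hne : aLoop2 (rest.take j) 0 ≠ 0 := by omega
        simp only [List.take_succ_cons, aLoop2, if_neg hc, List.head?]
        rw [if_neg (by omega : ¬ (0:Int) > 0)]
        simp [hne, hc]

-- ===== VERDICT (by name: the statement is the Claim_ definition above) =====
theorem check_spec : Claim_equal_check := by
  intro p _
  unfold Spec_check
  exact main_eq p
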